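-- pv_equiv track=rewrite | github.com/Arulraj25/365-calenda | app.py | get_animation
-- ===== SOURCE A (Python) =====
-- def get_animation(day_name):
--     """Get animation for day"""
--     lower = day_name.lower()
--     if 'new year' in lower or 'christmas' in lower or 'independence' in lower:
--         return 'fireworks'
--     elif 'valentine' in lower or 'love' in lower or 'heart' in lower:
--         return 'hearts'
--     elif 'space' in lower or 'moon' in lower or 'planet' in lower or 'rocket' in lower:
--         return 'space'
--     elif any(word in lower for word in ['bird', 'cat', 'dog', 'pet', 'animal', 'wildlife', 'monkey']):
--         return 'animals'
--     elif any(word in lower for word in ['pizza', 'chocolate', 'coffee', 'ice cream', 'burger', 'pasta', 'cookie', 'cake']):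
--         return 'food'
--     elif 'music' in lower or 'dance' in lower:
--         return 'music'
--     elif 'art' in lower or 'paint' in lower:
--         return 'art'
--     elif 'peace' in lower or 'dove' in lower:
--         return 'peace'
--     elif 'science' in lower or 'math' in lower:
--         return 'science'
--     else:
--         return 'default'
-- ===== SOURCE B (Python) =====
-- ANIM_TABLE = [
--     (0, ['new year', 'christmas', 'independence'], 'fireworks'),
--     (1, ['valentine', 'love', 'heart'], 'hearts'),
--     (2, ['space', 'moon', 'planet', 'rocket'], 'space'),
--     (3, ['bird', 'cat', 'dog', 'pet', 'animal', 'wildlife', 'monkey'], 'animals'),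
--     (4, ['pizza', 'chocolate', 'coffee', 'ice cream', 'burger', 'pasta', 'cookie', 'cake'], 'food'),
--     (5, ['music', 'dance'], 'music'),
--     (6, ['art', 'paint'], 'art'),
--     (7, ['peace', 'dove'], 'peace'),
--     (8, ['science', 'math'], 'science'),
-- ]
--
--
-- def get_animation(day_name):
--     """Get animation for day: exhaustively scan every keyword, keeping the
--     best (lowest-priority-number) match seen so far; no early return."""
--     lower = day_name.lower()
--     best = None
--     for prio, keywords, category in ANIM_TABLE:
--         for kw in keywords:
--             if kw in lower and (best is None or prio < best[0]):
--                 best = (prio, category)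
--     return 'default' if best is None else best[1]
-- ===== Notes on version B (the rewrite author's own statement) =====
-- stated objective: alternative
-- what changed: Instead of A's early-returning if/elif cascade, B scans every keyword of every category exhaustively with an accumulator tracking the best (lowest-priority) match, and returns that minimum at the end; correct because the first true cascade branch is exactly the minimum-priority matched category.
import Mathlib
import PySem

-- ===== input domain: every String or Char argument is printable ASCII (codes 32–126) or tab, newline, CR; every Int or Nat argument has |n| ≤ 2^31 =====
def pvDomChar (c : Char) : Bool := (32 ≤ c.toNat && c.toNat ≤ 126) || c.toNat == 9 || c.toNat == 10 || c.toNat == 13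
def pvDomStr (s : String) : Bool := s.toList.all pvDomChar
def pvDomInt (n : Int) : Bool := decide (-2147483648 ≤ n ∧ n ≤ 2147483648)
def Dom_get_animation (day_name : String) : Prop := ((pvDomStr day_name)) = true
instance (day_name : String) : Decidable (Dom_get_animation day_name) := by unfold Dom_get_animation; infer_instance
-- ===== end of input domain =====

-- B replaces A's early-returning cascade by an exhaustive min-priority scan over all keywords (alternative; same cost).
-- ===== PORT A =====
def get_animation (day_name : String) : String :=
  let lower := PySem.Str.lower day_name
  if PySem.Str.isIn "new year" lower || PySem.Str.isIn "christmas" lower || PySem.Str.isIn "independence" lower then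
    "fireworks"
  else if PySem.Str.isIn "valentine" lower || PySem.Str.isIn "love" lower || PySem.Str.isIn "heart" lower then
    "hearts"
  else if PySem.Str.isIn "space" lower || PySem.Str.isIn "moon" lower || PySem.Str.isIn "planet" lower || PySem.Str.isIn "rocket" lower then
    "space"
  else if ["bird", "cat", "dog", "pet", "animal", "wildlife", "monkey"].any (fun word => PySem.Str.isIn word lower) then
    "animals"
  else if ["pizza", "chocolate", "coffee", "ice cream", "burger", "pasta", "cookie", "cake"].any (fun word => PySem.Str.isIn word lower) then
    "food"
  else if PySem.Str.isIn "music" lower || PySem.Str.isIn "dance" lower then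
    "music"
  else if PySem.Str.isIn "art" lower || PySem.Str.isIn "paint" lower then
    "art"
  else if PySem.Str.isIn "peace" lower || PySem.Str.isIn "dove" lower then
    "peace"
  else if PySem.Str.isIn "science" lower || PySem.Str.isIn "math" lower then
    "science"
  else
    "default"

-- ===== PORT B =====
def animTable : List (Int × List String × String) :=
  [ (0, ["new year", "christmas", "independence"], "fireworks"),
    (1, ["valentine", "love", "heart"], "hearts"),
    (2, ["space", "moon", "planet", "rocket"], "space"),
    (3, ["bird", "cat", "dog", "pet", "animal", "wildlife", "monkey"], "animals"),
    (4, ["pizza", "chocolate", "coffee", "ice cream", "burger", "pasta", "cookie", "cake"], "food"),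
    (5, ["music", "dance"], "music"),
    (6, ["art", "paint"], "art"),
    (7, ["peace", "dove"], "peace"),
    (8, ["science", "math"], "science") ]

-- 'best is None or prio < best[0]'
def animAllow (best : Option (Int × String)) (prio : Int) : Bool :=
  match best with
  | none => true
  | some (q, _) => decide (prio < q)

-- the nested for-loops with the 'best' accumulator
def get_animation_alt (day_name : String) : String :=
  let lower := PySem.Str.lower day_name
  let best := animTable.foldl (fun best row =>
      row.2.1.foldl (fun best kw =>
          if PySem.Str.isIn kw lower && animAllow best row.1 then some (row.1, row.2.2) else best)
        best)
    none
  match best with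
  | none => "default"
  | some (_, c) => c

-- ===== PRECONDITION & SPEC =====
def Spec_get_animation (day_name : String) (out : String) : Prop := out = get_animation_alt day_name
instance (day_name : String) (out : String) : Decidable (Spec_get_animation day_name out) := by unfold Spec_get_animation; infer_instance

-- ===== CLAIM (what is proved, stated in full; the proofs are below) =====
def Claim_equal_get_animation : Prop := ∀ (day_name : String), Dom_get_animation day_name → Spec_get_animation day_name (get_animation day_name)

-- ===== LEMMAS AND PROOFS =====

-- Folding one category's keyword block either installs (p, c) (if some keyword matches and
-- the accumulator admits priority p) or leaves the accumulator unchanged.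
theorem animAllow_some_self (p : Int) (c : String) : animAllow (some (p, c)) p = false := by
  simp [animAllow]

theorem anim_inner_foldl (m : String → Bool) (p : Int) (c : String) (kws : List String)
    (best : Option (Int × String)) :
    kws.foldl (fun best kw => if m kw && animAllow best p then some (p, c) else best) best
      = if kws.any m && animAllow best p then some (p, c) else best := by
  induction kws generalizing best with
  | nil => simp
  | cons kw rest ih =>
    simp only [List.foldl_cons, List.any_cons, ih]
    by_cases h : m kw = true
    · by_cases ha : animAllow best p = true
      · simp [h, ha, animAllow_some_self]
      · simp only [Bool.not_eq_true] at ha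
        simp [h, ha]
    · simp only [Bool.not_eq_true] at h
      simp [h]

-- The chain of nine min-tracking updates agrees with the nine-branch cascade (pure Bool fact).
theorem anim_chain (b0 b1 b2 b3 b4 b5 b6 b7 b8 : Bool) :
    (if b0 then "fireworks" else if b1 then "hearts" else if b2 then "space"
     else if b3 then "animals" else if b4 then "food" else if b5 then "music"
     else if b6 then "art" else if b7 then "peace" else if b8 then "science" else "default")
  = (let a0 : Option (Int × String) := if b0 && animAllow none 0 then some (0, "fireworks") else none
     let a1 := if b1 && animAllow a0 1 then some (1, "hearts") else a0
     let a2 := if b2 && animAllow a1 2 then some (2, "space") else a1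
     let a3 := if b3 && animAllow a2 3 then some (3, "animals") else a2
     let a4 := if b4 && animAllow a3 4 then some (4, "food") else a3
     let a5 := if b5 && animAllow a4 5 then some (5, "music") else a4
     let a6 := if b6 && animAllow a5 6 then some (6, "art") else a5
     let a7 := if b7 && animAllow a6 7 then some (7, "peace") else a6
     let a8 := if b8 && animAllow a7 8 then some (8, "science") else a7
     match a8 with
     | none => "default"
     | some (_, c) => c) := by
  cases b0 <;> cases b1 <;> cases b2 <;> cases b3 <;> cases b4 <;> cases b5 <;>
    cases b6 <;> cases b7 <;> cases b8 <;> rfl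

-- ===== VERDICT (by name: the statement is the Claim_ definition above) =====
theorem get_animation_spec : Claim_equal_get_animation := by
  intro day_name _
  unfold Spec_get_animation get_animation get_animation_alt animTable
  simp only [List.foldl_cons, List.foldl_nil, anim_inner_foldl, List.any_cons, List.any_nil,
    Bool.or_false, Bool.or_assoc]
  exact anim_chain _ _ _ _ _ _ _ _ _
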